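-- pv_equiv track=rewrite | github.com/MikulasIbl/Doors | Nová složka/doorsFaster.py | allEnds
-- ===== SOURCE A (Python) =====
-- def lastChar(text):
--     return text[-1]
--
-- def allEnds(words):
--     ends = {}
--     for word in words:
--         char = lastChar(word)
--         if char in ends.keys():
--             ends[char] = ends[char]+1
--         else:
--             ends[char] = 1
--     return ends
-- ===== SOURCE B (Python) =====
-- def allEnds(words):
--     # recursive partitioning: take the first last-character, count its block,
--     # recurse on the list with that character removed
--     lasts = [word[-1] for word in words]
--
--     def go(ls):
--         if not ls:
--             return {}
--         c = ls[0]
--         rest = go([x for x in ls if x != c])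
--         return {c: len([x for x in ls if x == c]), **rest}
--
--     return go(lasts)
-- ===== Notes on version B (the rewrite author's own statement) =====
-- stated objective: alternative
-- what changed: Replaces the single-pass dict-counter loop by a recursive quickselect-style partition: peel off the first last-character, count and remove its whole block with two filters, and recurse on the remainder.
-- outside the precondition, e.g. on allEnds(['ab', '']): A raises IndexError, B raises IndexError
import Mathlib
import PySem

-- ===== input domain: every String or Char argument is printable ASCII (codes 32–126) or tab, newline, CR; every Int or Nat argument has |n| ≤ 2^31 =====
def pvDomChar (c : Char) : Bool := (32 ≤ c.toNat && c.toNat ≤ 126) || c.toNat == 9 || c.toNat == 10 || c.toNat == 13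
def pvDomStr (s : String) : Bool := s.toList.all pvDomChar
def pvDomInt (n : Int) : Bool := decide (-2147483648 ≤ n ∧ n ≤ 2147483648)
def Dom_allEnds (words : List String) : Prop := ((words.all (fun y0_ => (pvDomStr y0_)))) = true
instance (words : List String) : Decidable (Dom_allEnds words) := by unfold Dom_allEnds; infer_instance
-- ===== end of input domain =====

-- B replaces A's single-pass dict-counter loop by a recursive quickselect-style
-- partition (count and remove the first character's block, recurse); alternative, not faster.


-- ===== PORT A =====
-- lastChar(text) = text[-1]; total wrapper, the `none` (IndexError on "") case is excluded by Pre_allEnds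
def lastCharStr (text : String) : String :=
  match PySem.Str.pyGet? text (-1) with
  | some c => String.ofList [c]
  | none => ""

def allEnds (words : List String) : List (String × Int) :=
  (words.foldl (fun ends word =>
      if ends.contains (lastCharStr word) then
        ends.insert (lastCharStr word) (ends.getD (lastCharStr word) 0 + 1)
      else ends.insert (lastCharStr word) 1)
    PySem.Dict.empty).items

-- ===== PORT B =====
-- go(ls): the dict literal {c: …, **rest} is a cons, exact because rest's keys come from
-- [x for x in ls if x != c] and so never contain c
def goAlt : List String → List (String × Int)
  | [] => []
  | c :: t =>
      (c, (((c :: t).filter (fun x => x == c)).length : Int)) ::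
        goAlt ((c :: t).filter (fun x => x != c))
termination_by l => l.length
decreasing_by
  simp only [List.filter_cons, bne_self_eq_false, List.length_cons]
  exact Nat.lt_succ_of_le (List.length_filter_le _ _)

def allEnds_alt (words : List String) : List (String × Int) :=
  goAlt (words.map lastCharStr)

-- ===== PRECONDITION & SPEC =====
-- Pre_ excludes lists containing an empty word, on which both A and B raise IndexError at word[-1]
def Pre_allEnds (words : List String) : Prop := (words.all (fun w => w ≠ "")) = true
instance (words : List String) : Decidable (Pre_allEnds words) := by unfold Pre_allEnds; infer_instance
def pvWitness_allEnds : List String := ["ab", "cb", "d"]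

def Spec_allEnds (words : List String) (out : List (String × Int)) : Prop := out = allEnds_alt words
instance (words : List String) (out : List (String × Int)) : Decidable (Spec_allEnds words out) := by unfold Spec_allEnds; infer_instance

-- ===== CLAIM (what is proved, stated in full; the proofs are below) =====
def Claim_equal_allEnds : Prop := ∀ (words : List String), Dom_allEnds words → Pre_allEnds words → Spec_allEnds words (allEnds words)

-- ===== LEMMAS AND PROOFS =====
-- A's loop body is exactly the insert-getD counter step
theorem allEnds_step_eq (ends : PySem.Dict String Int) (char : String) :
    (if ends.contains char then ends.insert char (ends.getD char 0 + 1)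
     else ends.insert char 1) = ends.insert char (ends.getD char 0 + 1) := by
  by_cases h : ends.contains char = true
  · simp [h]
  · simp only [Bool.not_eq_true] at h
    simp [h, PySem.Dict.getD_of_not_contains (h := h)]

theorem set_add_of_mem {a : Type} [BEq a] [LawfulBEq a] {s : PySem.Set a} {x : a}
    (h : x ∈ s) : PySem.Set.add s x = s := by
  simp [PySem.Set.add, h]

theorem set_add_of_not_mem {a : Type} [BEq a] [LawfulBEq a] {s : PySem.Set a} {x : a}
    (h : x ∉ s) : PySem.Set.add s x = s ++ [x] := by
  simp [PySem.Set.add, h]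

theorem mem_set_add {a : Type} [BEq a] [LawfulBEq a] {s : PySem.Set a} {c : a} (x : a)
    (h : c ∈ s) : c ∈ PySem.Set.add s x := by
  by_cases hx : x ∈ s
  · rw [set_add_of_mem hx]; exact h
  · rw [set_add_of_not_mem hx]; exact List.mem_append_left _ h

-- folding Set.add over a list ignores the elements already in the accumulator
theorem foldl_add_filter {a : Type} [BEq a] [LawfulBEq a] (c : a) (t : List a)
    (acc : PySem.Set a) (h : c ∈ acc) :
    t.foldl PySem.Set.add acc = (t.filter (fun x => x != c)).foldl PySem.Set.add acc := by
  induction t generalizing acc with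
  | nil => rfl
  | cons x xs ih =>
    by_cases hx : x = c
    · subst hx
      have hfc : ((x :: xs).filter (fun y => y != x)) = xs.filter (fun y => y != x) := by simp
      rw [hfc, List.foldl_cons, set_add_of_mem h]
      exact ih acc h
    · have hfc : ((x :: xs).filter (fun y => y != c)) = x :: xs.filter (fun y => y != c) := by
        simp [hx]
      rw [hfc, List.foldl_cons, List.foldl_cons]
      exact ih (PySem.Set.add acc x) (mem_set_add x h)

-- a head that no later element equals passes through the Set.add fold
theorem foldl_add_cons_acc {a : Type} [BEq a] [LawfulBEq a] (c : a) (l : List a)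
    (hl : ∀ x ∈ l, x ≠ c) (s : PySem.Set a) (hcs : c ∉ s) :
    l.foldl PySem.Set.add (c :: s) = c :: l.foldl PySem.Set.add s := by
  induction l generalizing s with
  | nil => rfl
  | cons x xs ih =>
    have hx : x ≠ c := hl x (by simp)
    rw [List.foldl_cons, List.foldl_cons]
    by_cases hmem : x ∈ s
    · rw [set_add_of_mem (show x ∈ c :: s by simp [hmem]), set_add_of_mem hmem]
      exact ih (fun y hy => hl y (by simp [hy])) s hcs
    · rw [set_add_of_not_mem (show x ∉ c :: s by simp [hx, hmem]),
        set_add_of_not_mem hmem]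
      have : c :: s ++ [x] = c :: (s ++ [x]) := by simp
      rw [this]
      refine ih (fun y hy => hl y (by simp [hy])) (s ++ [x]) ?_
      intro hmem'
      rcases List.mem_append.mp hmem' with h | h
      · exact hcs h
      · have hcx : c = x := by simpa using h
        exact hx hcx.symm

theorem ofList_cons_filter {a : Type} [BEq a] [LawfulBEq a] (c : a) (t : List a) :
    PySem.Set.ofList (c :: t) = c :: PySem.Set.ofList (t.filter (fun x => x != c)) := by
  show (c :: t).foldl PySem.Set.add PySem.Set.empty = _
  have h0 : (c :: t).foldl PySem.Set.add PySem.Set.empty = t.foldl PySem.Set.add [c] := by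
    simp [PySem.Set.add, PySem.Set.empty]
  rw [h0, foldl_add_filter c t [c] (by simp)]
  exact foldl_add_cons_acc c _ (fun x hx => by simpa using (List.of_mem_filter hx)) []
    (by simp)

-- goAlt computes the first-occurrence keys paired with their counts
theorem goAlt_eq (l : List String) :
    goAlt l = (PySem.Set.ofList l).map (fun k => (k, (l.count k : Int))) := by
  induction l using goAlt.induct with
  | case1 => simp [goAlt, PySem.Set.ofList, PySem.Set.empty]
  | case2 c t ih =>
    have hfc : ((c :: t).filter (fun x => x != c)) = t.filter (fun x => x != c) := by simp
    rw [goAlt]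
    rw [hfc] at ih ⊢
    rw [ih, ofList_cons_filter]
    simp only [List.map_cons]
    congr 1
    · congr 1
      simp [List.count, List.countP_eq_length_filter]
    · apply List.map_congr_left
      intro k hk
      have hk' : k ∈ t.filter (fun x => x != c) := by
        simpa [PySem.Set.mem_ofList] using hk
      have hne : k ≠ c := by simpa using (List.of_mem_filter hk')
      have h1 : (t.filter (fun x => x != c)).count k = t.count k := by
        rw [List.count_filter (by simp [hne])]
      have h2 : (c :: t).count k = t.count k := by simp [hne.symm]
      simp [h1, h2]

-- ===== VERDICT (by name: the statement is the Claim_ definition above) =====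
theorem allEnds_spec : Claim_equal_allEnds := by
  intro words _ _
  unfold Spec_allEnds allEnds allEnds_alt
  have hf : (fun (ends : PySem.Dict String Int) (word : String) =>
      if ends.contains (lastCharStr word) then
        ends.insert (lastCharStr word) (ends.getD (lastCharStr word) 0 + 1)
      else ends.insert (lastCharStr word) 1)
      = (fun ends word => ends.insert (lastCharStr word) (ends.getD (lastCharStr word) 0 + 1)) := by
    funext ends word
    exact allEnds_step_eq ends (lastCharStr word)
  have h1 : words.foldl
      (fun (ends : PySem.Dict String Int) word =>
        ends.insert (lastCharStr word) (ends.getD (lastCharStr word) 0 + 1))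
      PySem.Dict.empty
      = (words.map lastCharStr).foldl
          (fun ends char => ends.insert char (ends.getD char 0 + 1)) PySem.Dict.empty :=
    (List.foldl_map (f := lastCharStr)
      (g := fun (ends : PySem.Dict String Int) char => ends.insert char (ends.getD char 0 + 1))).symm
  rw [hf, h1, PySem.Dict.foldl_insert_getD_add_one_eq_counter,
    PySem.Dict.items_counter, goAlt_eq]
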